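-- pv_equiv track=rewrite | github.com/ronlevin1/Multi-Scale-Image-Blending-System | ex3.py | max_pyramid_levels
-- ===== SOURCE A (Python) =====
-- def max_pyramid_levels(shape):
--     h, w = shape[:2]
--     levels = 1
--     while min(h, w) >= 2:
--         h = (h + 1) // 2
--         w = (w + 1) // 2
--         levels += 1
--     return levels
-- ===== SOURCE B (Python) =====
-- def max_pyramid_levels(shape):
--     m = min(shape[0], shape[1])
--     if m < 2:
--         return 1
--     return 1 + (m - 1).bit_length()
-- ===== Notes on version B (the rewrite author's own statement) =====
-- stated objective: simpler
-- what changed: Replaces the iterative ceiling-halving loop with the closed form 1 + (min(h,w)-1).bit_length(), an O(1) integer-log computation (guarded by m < 2 -> 1).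
import Mathlib
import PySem

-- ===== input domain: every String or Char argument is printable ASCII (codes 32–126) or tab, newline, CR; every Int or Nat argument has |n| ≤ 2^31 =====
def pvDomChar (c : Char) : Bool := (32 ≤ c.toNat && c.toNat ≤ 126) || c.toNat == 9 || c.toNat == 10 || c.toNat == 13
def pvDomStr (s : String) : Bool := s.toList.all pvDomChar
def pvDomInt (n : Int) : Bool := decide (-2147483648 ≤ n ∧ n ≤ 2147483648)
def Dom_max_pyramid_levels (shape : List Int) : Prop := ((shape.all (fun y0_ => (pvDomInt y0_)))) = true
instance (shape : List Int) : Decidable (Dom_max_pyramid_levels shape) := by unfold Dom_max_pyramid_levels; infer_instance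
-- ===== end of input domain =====

-- B replaces A's ceiling-halving loop by the closed form 1 + (min h w - 1).bit_length(); objective: simpler (no loop).

-- ===== PORT A =====
-- the while loop of A, state (h, w, levels)
def pvALoop (h w levels : Int) : Int :=
  if 2 ≤ min h w then
    pvALoop (PySem.Int.floordiv (h + 1) 2) (PySem.Int.floordiv (w + 1) 2) (levels + 1)
  else levels
termination_by (min h w).toNat
decreasing_by
  rw [PySem.Int.floordiv_eq_ediv_of_pos (by omega), PySem.Int.floordiv_eq_ediv_of_pos (by omega)]
  omega

def max_pyramid_levels (shape : List Int) : Int :=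
  match PySem.List.slice shape none (some 2) with
  | [h, w] => pvALoop h w 1
  | _ => 0   -- 'h, w = shape[:2]' raises ValueError here (len < 2); excluded by Pre_

-- ===== PORT B =====
def max_pyramid_levels_alt (shape : List Int) : Int :=
  match PySem.List.pyGet? shape 0, PySem.List.pyGet? shape 1 with
  | some h, some w =>
      let m := min h w
      if m < 2 then 1 else 1 + (PySem.Int.bitLength (m - 1) : Int)
  | _, _ => 0   -- 'shape[0]' / 'shape[1]' raises IndexError here (len < 2); excluded by Pre_

-- ===== PRECONDITION & SPEC =====
-- Pre_ excludes only shapes of length < 2, on which both A and B raise ValueError at the unpacking.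
def Pre_max_pyramid_levels (shape : List Int) : Prop := 2 ≤ shape.length
instance (shape : List Int) : Decidable (Pre_max_pyramid_levels shape) := by
  unfold Pre_max_pyramid_levels; infer_instance
def pvWitness_max_pyramid_levels : List Int := [4, 6]

def Spec_max_pyramid_levels (shape : List Int) (out : Int) : Prop := out = max_pyramid_levels_alt shape
instance (shape : List Int) (out : Int) : Decidable (Spec_max_pyramid_levels shape out) := by
  unfold Spec_max_pyramid_levels; infer_instance

-- ===== CLAIM (what is proved, stated in full; the proofs are below) =====
def Claim_equal_max_pyramid_levels : Prop := ∀ (shape : List Int), Dom_max_pyramid_levels shape → Pre_max_pyramid_levels shape → Spec_max_pyramid_levels shape (max_pyramid_levels shape)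

-- ===== LEMMAS AND PROOFS =====

-- one halving step on the bit length: for m ≥ 2, (m-1).bit_length = ((m+1)//2 - 1).bit_length + 1
lemma pvBitLengthStep (m : Int) (hm : 2 ≤ m) :
    (PySem.Int.bitLength (m - 1) : Int)
      = (PySem.Int.bitLength (PySem.Int.floordiv (m + 1) 2 - 1) : Int) + 1 := by
  have hbl := PySem.Int.bitLength_of_pos (n := m - 1) (by omega)
  have hdiv : PySem.Int.floordiv (m + 1) 2 - 1 = PySem.Int.floordiv (m - 1) 2 := by
    rw [PySem.Int.floordiv_eq_ediv_of_pos (by omega), PySem.Int.floordiv_eq_ediv_of_pos (by omega)]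
    omega
  rw [hdiv, hbl]
  push_cast
  ring

lemma pvMinHalf (h w : Int) :
    min (PySem.Int.floordiv (h + 1) 2) (PySem.Int.floordiv (w + 1) 2)
      = PySem.Int.floordiv (min h w + 1) 2 := by
  rw [PySem.Int.floordiv_eq_ediv_of_pos (b := 2) (by omega),
      PySem.Int.floordiv_eq_ediv_of_pos (b := 2) (by omega),
      PySem.Int.floordiv_eq_ediv_of_pos (b := 2) (by omega)]
  omega

lemma pvALoop_eq (n : Nat) : ∀ (h w L : Int), (min h w).toNat ≤ n →
    pvALoop h w L = L + (if min h w < 2 then 0 else (PySem.Int.bitLength (min h w - 1) : Int)) := by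
  induction n with
  | zero =>
    intro h w L hn
    rw [pvALoop]
    have hlt : ¬ (2 ≤ min h w) := by omega
    rw [if_neg hlt, if_pos (by omega)]
    omega
  | succ n ih =>
    intro h w L hn
    rw [pvALoop]
    by_cases hc : 2 ≤ min h w
    · have hmeas : (min (PySem.Int.floordiv (h + 1) 2) (PySem.Int.floordiv (w + 1) 2)).toNat ≤ n := by
        rw [pvMinHalf, PySem.Int.floordiv_eq_ediv_of_pos (by omega)]
        omega
      rw [if_pos hc, ih _ _ _ hmeas, pvMinHalf, if_neg (show ¬ (min h w < 2) by omega),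
          pvBitLengthStep (min h w) hc]
      by_cases h2 : PySem.Int.floordiv (min h w + 1) 2 < 2
      · have hm1 : PySem.Int.floordiv (min h w + 1) 2 = 1 := by
          rw [PySem.Int.floordiv_eq_ediv_of_pos (by omega)] at h2 ⊢
          omega
        rw [if_pos h2, hm1]
        have hz : (PySem.Int.bitLength ((1:Int) - 1) : Int) = 0 := by decide
        rw [hz]
        ring
      · rw [if_neg h2]
        ring
    · rw [if_neg hc, if_pos (by omega)]
      omega

-- ===== VERDICT (by name: the statement is the Claim_ definition above) =====
theorem max_pyramid_levels_spec : Claim_equal_max_pyramid_levels := by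
  intro shape _ hpre
  unfold Pre_max_pyramid_levels at hpre
  match shape, hpre with
  | a :: b :: t, _ =>
    unfold Spec_max_pyramid_levels max_pyramid_levels max_pyramid_levels_alt
    have hs : PySem.List.slice (a :: b :: t) none (some 2) = [a, b] := by
      simp [PySem.List.slice]
    have h0 : PySem.List.pyGet? (a :: b :: t) 0 = some a := by
      simp [PySem.List.pyGet?, PySem.List.pyIdx?]
      rw [if_pos (by omega)]
      rfl
    have h1 : PySem.List.pyGet? (a :: b :: t) 1 = some b := by
      simp [PySem.List.pyGet?, PySem.List.pyIdx?]
    rw [hs, h0, h1]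
    simp only []
    rw [pvALoop_eq (min a b).toNat a b 1 (le_refl _)]
    by_cases hlt : min a b < 2
    · rw [if_pos hlt, if_pos hlt]; ring
    · rw [if_neg hlt, if_neg hlt]
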